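-- pv_equiv track=rewrite | github.com/PierreMercuriali/multigloss | glossary2.py | filtre
-- ===== SOURCE A (Python) =====
-- def filtre(words):#not super efficient but eh
--     kept = {}
--     for w in words:
--         if w in kept.keys():
--             kept[w].append(w)
--         else:
--             kept[w] = [w]
--     for w in words:
--         for k in kept.keys():
--             if w in k:
--                 kept[k].append(w)
--     classes = []
--     for k in kept.keys():
--         classes.append(sorted(kept[k])[0])
--     return set(classes)
-- ===== SOURCE B (Python) =====
-- def filtre(words):
--     # Dedupe once, sort the distinct words, then for each distinct word take the
--     # first (i.e. smallest) sorted word contained in it.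
--     distinct = list(dict.fromkeys(words))
--     order = sorted(distinct)
--     out = []
--     for k in distinct:
--         for w in order:
--             if w in k:
--                 out.append(w)
--                 break
--     return set(out)
-- ===== Notes on version B (the rewrite author's own statement) =====
-- stated objective: faster
-- what changed: Instead of building a per-key list of duplicates and contained words and sorting each list to take its minimum, B dedupes the words once, sorts the distinct words once, and for each distinct word scans the sorted order and stops at the first contained word (which is the group minimum).
import Mathlib
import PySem

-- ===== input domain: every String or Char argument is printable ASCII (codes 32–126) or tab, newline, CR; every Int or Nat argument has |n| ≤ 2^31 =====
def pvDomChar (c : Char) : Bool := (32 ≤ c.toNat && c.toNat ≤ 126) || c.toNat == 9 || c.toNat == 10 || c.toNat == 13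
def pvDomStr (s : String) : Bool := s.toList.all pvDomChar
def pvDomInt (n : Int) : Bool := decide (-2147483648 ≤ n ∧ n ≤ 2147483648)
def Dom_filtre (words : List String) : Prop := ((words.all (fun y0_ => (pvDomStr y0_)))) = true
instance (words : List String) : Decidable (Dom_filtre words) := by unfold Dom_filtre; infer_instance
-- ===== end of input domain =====

-- B replaces A's per-key duplicate lists and per-key sorts by one dedup + one global
-- sort and a first-match (early-exit) scan per distinct word.

-- ===== PORT A =====
-- Literal transliteration of the Python A: a dict from word to a list collecting the
-- word's duplicates and every word contained in it, then min of each list via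
-- sorted(...)[0]; the 'none' branch of the match is a totalization guard only
-- (kept2[k] always contains k, so sorted(...)[0] never raises in Python).
def filtre (words : List String) : List String :=
  let kept1 := words.foldl (fun d w =>
      if d.contains w then d.modify w [] (fun l => l ++ [w])
      else d.insert w [w]) PySem.Dict.empty
  let kept2 := words.foldl (fun d w =>
      d.keys.foldl (fun d' k =>
        if PySem.Str.isIn w k then d'.modify k [] (fun l => l ++ [w]) else d') d) kept1
  let classes := kept2.keys.foldl (fun acc k =>
      match PySem.List.pyGet? (PySem.List.sorted (kept2.getD k []) (fun x => x) false) 0 with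
      | some m => acc ++ [m]
      | none => acc) []
  PySem.Set.ofList classes

-- ===== PORT B =====
-- Transliteration of Source B: dedupe, sort the distinct words once, then for each
-- distinct word take the first sorted word contained in it (the 'break' = find?).
def filtre_alt (words : List String) : List String :=
  let distinct := PySem.List.dedup words
  let order := PySem.List.sorted distinct (fun x => x) false
  let out := distinct.foldl (fun acc k =>
      match order.find? (fun w => PySem.Str.isIn w k) with
      | some m => acc ++ [m]
      | none => acc) []
  PySem.Set.ofList out

-- ===== PRECONDITION & SPEC =====
def Spec_filtre (words : List String) (out : List String) : Prop := out = filtre_alt words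
instance (words : List String) (out : List String) : Decidable (Spec_filtre words out) := by unfold Spec_filtre; infer_instance

-- ===== CLAIM (what is proved, stated in full; the proofs are below) =====
def Claim_equal_filtre : Prop := ∀ (words : List String), Dom_filtre words → Spec_filtre words (filtre words)

-- ===== LEMMAS AND PROOFS =====

-- A's first loop is extensionally a plain modify-loop (insert of [w] = modify with default []).
lemma stepA_eq_modify (d : PySem.Dict String (List String)) (w : String) :
    (if d.contains w then d.modify w [] (fun l => l ++ [w]) else d.insert w [w])
      = d.modify w [] (fun l => l ++ [w]) := by
  by_cases h : d.contains w
  · simp [h]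
  · simp only [Bool.not_eq_true] at h
    simp [PySem.Dict.modify, PySem.Dict.getD_of_not_contains d ([] : List String) h, h]

lemma kept1_eq (words : List String) :
    words.foldl (fun d w =>
      if d.contains w then d.modify w [] (fun l => l ++ [w])
      else d.insert w [w]) PySem.Dict.empty
    = words.foldl (fun d w => d.modify w [] (fun l => l ++ [w])) PySem.Dict.empty :=
  PySem.List.foldl_congr_mem _ _ _ _ (fun acc x _ => stepA_eq_modify acc x)

-- After the first loop, slot c holds exactly the occurrences of c.
lemma kept1_getD (words : List String) (c : String) :
    (words.foldl (fun d w => d.modify w [] (fun l => l ++ [w]))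
        (PySem.Dict.empty : PySem.Dict String (List String))).getD c []
      = words.filter (fun w => w == c) := by
  have h := PySem.Dict.getD_foldl_modify_append (words.map (fun w => (w, w)))
      (PySem.Dict.empty : PySem.Dict String (List String)) c
  rw [List.foldl_map] at h
  simpa [Function.comp_def, List.filter_map] using h

lemma kept1_keys (words : List String) :
    (words.foldl (fun d w => d.modify w [] (fun l => l ++ [w]))
        (PySem.Dict.empty : PySem.Dict String (List String))).keys
      = PySem.List.dedup words := by
  have h := PySem.Dict.keys_foldl_modify words ([] : List String)
      (fun _ x => fun l => l ++ [x]) (PySem.Dict.empty : PySem.Dict String (List String))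
  simpa [PySem.Set.update, PySem.Set.ofList_eq_foldl] using h

-- One inner pass of A's second loop: effect on one slot.
lemma inner_getD (K : List String) (w : String) (d : PySem.Dict String (List String))
    (hnd : K.Nodup) (c : String) :
    (K.foldl (fun d' k =>
        if PySem.Str.isIn w k then d'.modify k [] (fun l => l ++ [w]) else d') d).getD c []
      = d.getD c [] ++ (if c ∈ K ∧ PySem.Str.isIn w c then [w] else []) := by
  induction K generalizing d with
  | nil => simp
  | cons k K ih =>
    rw [List.nodup_cons] at hnd
    rw [List.foldl_cons]
    by_cases hw : PySem.Str.isIn w k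
    · rw [if_pos hw, ih _ hnd.2, PySem.Dict.getD_modify]
      by_cases hc : c = k
      · subst hc
        have : c ∉ K := hnd.1
        simp only [PySem.Str.isIn] at hw; simp [this, hw]
      · simp only [if_neg hc]
        by_cases hcK : c ∈ K <;> simp [hcK, hc]
    · rw [if_neg hw, ih _ hnd.2]
      by_cases hc : c = k
      · subst hc; simp only [PySem.Str.isIn] at hw; simp [hw]
      · by_cases hcK : c ∈ K <;> simp [hcK, hc]

-- One inner pass of A's second loop: keys are unchanged.
lemma inner_keys (K : List String) (w : String) (d : PySem.Dict String (List String))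
    (hK : ∀ k ∈ K, k ∈ d.keys) :
    (K.foldl (fun d' k =>
        if PySem.Str.isIn w k then d'.modify k [] (fun l => l ++ [w]) else d') d).keys
      = d.keys := by
  induction K generalizing d with
  | nil => simp
  | cons k K ih =>
    rw [List.foldl_cons]
    by_cases hw : PySem.Str.isIn w k
    · rw [if_pos hw]
      have hkeys : (d.modify k [] (fun l => l ++ [w])).keys = d.keys := by
        rw [PySem.Dict.keys_modify, PySem.Dict.keys_insert_of_contains]
        rw [PySem.Dict.contains_iff_mem_keys]
        exact hK k (by simp)
      rw [ih _ (fun k' hk' => by rw [hkeys]; exact hK k' (by simp [hk'])), hkeys]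
    · rw [if_neg hw]
      exact ih _ (fun k' hk' => hK k' (by simp [hk']))

lemma kept2_keys (ws : List String) (d : PySem.Dict String (List String)) :
    (ws.foldl (fun d w =>
        d.keys.foldl (fun d' k =>
          if PySem.Str.isIn w k then d'.modify k [] (fun l => l ++ [w]) else d') d) d).keys
      = d.keys := by
  induction ws generalizing d with
  | nil => simp
  | cons w ws ih =>
    rw [List.foldl_cons, ih, inner_keys _ _ _ (fun k hk => hk)]

-- A's second loop appends to slot c exactly the words contained in c.
lemma kept2_getD (ws : List String) (d : PySem.Dict String (List String))
    (hnd : d.keys.Nodup) (c : String) (hc : c ∈ d.keys) :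
    (ws.foldl (fun d w =>
        d.keys.foldl (fun d' k =>
          if PySem.Str.isIn w k then d'.modify k [] (fun l => l ++ [w]) else d') d) d).getD c []
      = d.getD c [] ++ ws.filter (fun w => PySem.Str.isIn w c) := by
  induction ws generalizing d with
  | nil => simp
  | cons w ws ih =>
    rw [List.foldl_cons]
    have hkeys := inner_keys d.keys w d (fun k hk => hk)
    rw [ih _ (by rw [hkeys]; exact hnd) (by rw [hkeys]; exact hc)]
    rw [inner_getD d.keys w d hnd c]
    by_cases hw : PySem.Str.isIn w c <;> simp only [PySem.Str.isIn] at hw <;> simp [hw, hc]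

-- The first match in a ≤-sorted list is minimal among all matches.
lemma find?_min {l : List String} (h : l.Pairwise (· ≤ ·)) {p : String → Bool} {m : String}
    (hf : l.find? p = some m) : ∀ y ∈ l, p y = true → m ≤ y := by
  induction l with
  | nil => simp at hf
  | cons a l ih =>
    rw [List.pairwise_cons] at h
    by_cases ha : p a
    · rw [List.find?_cons_of_pos (by simpa using ha)] at hf
      cases hf
      intro y hy _
      rcases List.mem_cons.mp hy with rfl | hy
      · exact le_refl _
      · exact h.1 y hy
    · rw [List.find?_cons_of_neg (by simpa using ha)] at hf
      intro y hy hp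
      rcases List.mem_cons.mp hy with rfl | hy
      · exact absurd hp ha
      · exact ih h.2 hf y hy hp

-- Central fact: A's sorted(group)[0] equals B's first sorted match (both are the
-- minimum of the same set of words, by antisymmetry).
lemma min_eq (words : List String) (k : String) (hk : k ∈ words) :
    PySem.List.pyGet? (PySem.List.sorted
        (words.filter (fun w => w == k) ++ words.filter (fun w => PySem.Str.isIn w k))
        (fun x => x) false) 0
      = (PySem.List.sorted (PySem.List.dedup words) (fun x => x) false).find?
          (fun w => PySem.Str.isIn w k) := by
  have hkk : PySem.Str.isIn k k = true := by
    rw [PySem.Str.isIn_iff_infix]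
  set l := words.filter (fun w => w == k) ++ words.filter (fun w => PySem.Str.isIn w k) with hl
  have hmem : ∀ y, y ∈ l ↔ y ∈ words ∧ PySem.Str.isIn y k = true := by
    intro y
    simp only [hl, List.mem_append, List.mem_filter, beq_iff_eq]
    constructor
    · rintro (⟨hy, rfl⟩ | ⟨hy, hin⟩)
      · exact ⟨hy, hkk⟩
      · exact ⟨hy, hin⟩
    · rintro ⟨hy, hin⟩; exact Or.inr ⟨hy, hin⟩
  have hkl : k ∈ l := (hmem k).mpr ⟨hk, hkk⟩
  obtain ⟨m, t, hsort⟩ : ∃ m t, PySem.List.sorted l (fun x => x) false = m :: t := by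
    cases hs : PySem.List.sorted l (fun x => x) false with
    | nil => exact absurd ((PySem.List.sorted_eq_nil_iff l _ false).mp hs) (by
        intro h; rw [h] at hkl; exact absurd hkl (List.not_mem_nil))
    | cons m t => exact ⟨m, t, rfl⟩
  have hml : m ∈ l := (PySem.List.mem_sorted l (fun x => x) false m).mp (by rw [hsort]; simp)
  have hmle : ∀ y ∈ l, m ≤ y := PySem.List.key_head_sorted_le l (fun x => x) hsort
  set order := PySem.List.sorted (PySem.List.dedup words) (fun x => x) false with horder
  have hko : k ∈ order := by
    rw [horder, PySem.List.mem_sorted, PySem.List.mem_dedup]; exact hk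
  obtain ⟨m2, hf⟩ : ∃ m2, order.find? (fun w => PySem.Str.isIn w k) = some m2 := by
    have : (order.find? (fun w => PySem.Str.isIn w k)).isSome := by
      rw [List.find?_isSome]; exact ⟨k, hko, hkk⟩
    exact Option.isSome_iff_exists.mp this
  have hm2p : PySem.Str.isIn m2 k = true := by
    have h := List.find?_some (p := fun w => PySem.Str.isIn w k) hf
    simpa using h
  have hm2mem : m2 ∈ order := List.mem_of_find?_eq_some hf
  have hm2w : m2 ∈ words := by
    rw [horder, PySem.List.mem_sorted, PySem.List.mem_dedup] at hm2mem; exact hm2mem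
  have h1 : m ≤ m2 := hmle m2 ((hmem m2).mpr ⟨hm2w, hm2p⟩)
  have hmo : m ∈ order := by
    rw [horder, PySem.List.mem_sorted, PySem.List.mem_dedup]; exact ((hmem m).mp hml).1
  have h2 : m2 ≤ m := find?_min (PySem.List.sorted_pairwise _ _) hf m hmo ((hmem m).mp hml).2
  have : m = m2 := le_antisymm h1 h2
  subst this
  rw [hsort, hf]
  simp [PySem.List.pyGet?, PySem.List.pyIdx?]

lemma filtre_eq_alt (words : List String) : filtre words = filtre_alt words := by
  unfold filtre filtre_alt
  simp only []
  rw [kept1_eq]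
  set kept1 := words.foldl (fun d w => d.modify w [] (fun l => l ++ [w]))
      (PySem.Dict.empty : PySem.Dict String (List String)) with hk1
  set kept2 := words.foldl (fun d w =>
      d.keys.foldl (fun d' k =>
        if PySem.Str.isIn w k then d'.modify k [] (fun l => l ++ [w]) else d') d) kept1 with hk2
  have hkeys1 : kept1.keys = PySem.List.dedup words := kept1_keys words
  have hnd : kept1.keys.Nodup := by rw [hkeys1]; exact PySem.List.nodup_dedup words
  have hkeys2 : kept2.keys = PySem.List.dedup words := by
    rw [hk2, kept2_keys, hkeys1]
  have hgetD : ∀ c ∈ PySem.List.dedup words, kept2.getD c [] =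
      words.filter (fun w => w == c) ++ words.filter (fun w => PySem.Str.isIn w c) := by
    intro c hc
    rw [hk2, kept2_getD words kept1 hnd c (by rw [hkeys1]; exact hc), kept1_getD]
  rw [hkeys2]
  congr 1
  apply PySem.List.foldl_congr_mem
  intro acc k hkmem
  rw [hgetD k hkmem, min_eq words k (by rw [← PySem.List.mem_dedup]; exact hkmem)]

-- ===== VERDICT (by name: the statement is the Claim_ definition above) =====
theorem filtre_spec : Claim_equal_filtre := fun words _ => filtre_eq_alt words
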